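-- pv_equiv track=rewrite | github.com/pypi-data/pypi-mirror-396 | packages/quickpub/quickpub-4.0.0.tar.gz/quickpub-4.0.0/quickpub/classifiers.py | _split_name
-- ===== SOURCE A (Python) =====
-- def _split_name(name: str) -> str:
--     words = []
--     current_word = ""
--
--     for char in name:
--         if char.isupper():
--             if current_word:
--                 words.append(current_word)
--             current_word = char
--         else:
--             current_word += char
--
--     if current_word:
--         words.append(current_word)
--
--     return " ".join(words[:-1])
-- ===== SOURCE B (Python) =====
-- def _split_name(name: str) -> str:
--     # Two-level index scan: find each word's end by advancing past non-uppercase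
--     # characters, slice the word out, then join all words but the last.
--     words = []
--     start = 0
--     n = len(name)
--     while start < n:
--         end = start + 1
--         while end < n and not name[end].isupper():
--             end += 1
--         words.append(name[start:end])
--         start = end
--     return " ".join(words[:-1])
-- ===== Notes on version B (the rewrite author's own statement) =====
-- stated objective: alternative
-- what changed: B replaces A's character-by-character accumulation of the current word with a two-level index scan: an inner loop advances an end pointer past the non-uppercase run to find each word boundary and the word is sliced out of the string in one step.
import Mathlib
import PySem

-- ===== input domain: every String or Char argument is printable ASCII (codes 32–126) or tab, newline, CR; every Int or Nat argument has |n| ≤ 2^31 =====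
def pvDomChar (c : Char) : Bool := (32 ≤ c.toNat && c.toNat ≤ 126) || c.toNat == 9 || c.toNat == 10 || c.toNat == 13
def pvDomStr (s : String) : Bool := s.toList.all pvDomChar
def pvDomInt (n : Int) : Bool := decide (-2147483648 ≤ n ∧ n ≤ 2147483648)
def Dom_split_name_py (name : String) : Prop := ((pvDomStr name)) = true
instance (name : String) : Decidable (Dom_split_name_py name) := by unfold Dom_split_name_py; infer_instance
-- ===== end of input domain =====

-- B replaces A's character-by-character word accumulation with a two-level index
-- scan that finds each word's end index and slices the word out (alternative
-- decomposition, same linear cost).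

-- ===== PORT A =====
-- A's loop: left-to-right over the characters, append current_word to words
-- when an uppercase character starts a new word, else extend current_word.
def split_name_py (name : String) : String :=
  let st := name.toList.foldl
    (fun (st : List (List Char) × List Char) (c : Char) =>
      if PySem.Chars.isupper c then
        (if st.2 ≠ [] then st.1 ++ [st.2] else st.1, [c])
      else
        (st.1, st.2 ++ [c]))
    ([], [])
  let words := if st.2 ≠ [] then st.1 ++ [st.2] else st.1
  String.ofList (PySem.Chars.join [' '] (PySem.List.slice words none (some (-1))))

-- ===== PORT B =====
-- inner while loop: 'while end < n and not name[end].isupper(): end += 1'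
-- ('and' short-circuits, so the bound check is the outer dite)
def pvInnerEnd (cs : List Char) (e : Nat) : Nat :=
  if h : e < cs.length then
    if PySem.Chars.isupper cs[e] then e else pvInnerEnd cs (e + 1)
  else e
termination_by cs.length - e
decreasing_by omega

-- the inner loop never moves 'end' backwards (cited by pvOuter's decreasing_by)
theorem pvInnerEnd_ge (cs : List Char) (e : Nat) : e ≤ pvInnerEnd cs e := by
  unfold pvInnerEnd
  split
  · split
    · exact le_refl e
    · exact le_trans (by omega) (pvInnerEnd_ge cs (e + 1))
  · exact le_refl e
termination_by cs.length - e
decreasing_by omega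

-- outer while loop: 'while start < n: … words.append(name[start:end]); start = end'
def pvOuter (cs : List Char) (start : Nat) (words : List (List Char)) : List (List Char) :=
  if _h : start < cs.length then
    let e := pvInnerEnd cs (start + 1)
    pvOuter cs e (words ++ [PySem.List.slice cs (some (start : Int)) (some (e : Int))])
  else words
termination_by cs.length - start
decreasing_by
  have := pvInnerEnd_ge cs (start + 1)
  omega

def split_name_py_alt (name : String) : String :=
  let words := pvOuter name.toList 0 []
  String.ofList (PySem.Chars.join [' '] (PySem.List.slice words none (some (-1))))

-- ===== PRECONDITION & SPEC =====
def Spec_split_name_py (name : String) (out : String) : Prop := out = split_name_py_alt name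
instance (name : String) (out : String) : Decidable (Spec_split_name_py name out) := by unfold Spec_split_name_py; infer_instance

-- ===== CLAIM (what is proved, stated in full; the proofs are below) =====
def Claim_equal_split_name_py : Prop := ∀ (name : String), Dom_split_name_py name → Spec_split_name_py name (split_name_py name)

-- ===== LEMMAS AND PROOFS =====

-- Recursive characterisation of A's loop state: pending word cur, remaining input.
def goA : List Char → List Char → List (List Char)
  | cur, [] => if cur = [] then [] else [cur]
  | cur, c :: r =>
    if PySem.Chars.isupper c then
      (if cur = [] then goA [c] r else cur :: goA [c] r)
    else goA (cur ++ [c]) r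

-- Common structural word list: first char + longest non-uppercase run, repeat.
def wordsS : List Char → List (List Char)
  | [] => []
  | c :: r =>
    (c :: r.takeWhile (fun d => !PySem.Chars.isupper d)) ::
      wordsS (r.dropWhile (fun d => !PySem.Chars.isupper d))
termination_by s => s.length
decreasing_by
  have := (List.dropWhile_sublist (l := r) (fun d => !PySem.Chars.isupper d)).length_le
  simp
  omega

theorem pvTakeTW (p : Char → Bool) (l : List Char) :
    l.take (l.takeWhile p).length = l.takeWhile p := by
  induction l with
  | nil => rfl
  | cons a t ih => by_cases h : p a <;> simp [h, ih]

theorem pvDropTW (p : Char → Bool) (l : List Char) :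
    l.drop (l.takeWhile p).length = l.dropWhile p := by
  induction l with
  | nil => rfl
  | cons a t ih => by_cases h : p a <;> simp [h, ih]

theorem foldA_eq_goA (cs : List Char) (w : List (List Char)) (cur : List Char) :
    (if (List.foldl
          (fun (st : List (List Char) × List Char) (c : Char) =>
            if PySem.Chars.isupper c = true then (if st.2 = [] then st.1 else st.1 ++ [st.2], [c])
            else (st.1, st.2 ++ [c])) (w, cur) cs).2 = []
     then (List.foldl
          (fun (st : List (List Char) × List Char) (c : Char) =>
            if PySem.Chars.isupper c = true then (if st.2 = [] then st.1 else st.1 ++ [st.2], [c])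
            else (st.1, st.2 ++ [c])) (w, cur) cs).1
     else (List.foldl
          (fun (st : List (List Char) × List Char) (c : Char) =>
            if PySem.Chars.isupper c = true then (if st.2 = [] then st.1 else st.1 ++ [st.2], [c])
            else (st.1, st.2 ++ [c])) (w, cur) cs).1
        ++ [(List.foldl
          (fun (st : List (List Char) × List Char) (c : Char) =>
            if PySem.Chars.isupper c = true then (if st.2 = [] then st.1 else st.1 ++ [st.2], [c])
            else (st.1, st.2 ++ [c])) (w, cur) cs).2]) = w ++ goA cur cs := by
  induction cs generalizing w cur with
  | nil =>
    simp only [List.foldl_nil, goA]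
    by_cases hc : cur = [] <;> simp [hc]
  | cons c r ih =>
    simp only [List.foldl_cons, goA]
    by_cases hu : PySem.Chars.isupper c <;> by_cases hc : cur = [] <;>
      simp [hu, hc, ih]

theorem goA_eq_wordsS_aux (cs : List Char) (cur : List Char) (h : cur ≠ []) :
    goA cur cs =
      (cur ++ cs.takeWhile (fun d => !PySem.Chars.isupper d)) ::
        wordsS (cs.dropWhile (fun d => !PySem.Chars.isupper d)) := by
  induction cs generalizing cur with
  | nil => simp [goA, wordsS, h]
  | cons c r ih =>
    by_cases hu : PySem.Chars.isupper c
    · simp only [goA, hu, if_pos, h, List.takeWhile_cons, List.dropWhile_cons]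
      rw [ih [c] (by simp)]
      simp [wordsS]
    · simp only [goA, hu, List.takeWhile_cons, List.dropWhile_cons]
      rw [ih (cur ++ [c]) (by simp)]
      simp


theorem goA_eq_wordsS (cs : List Char) : goA [] cs = wordsS cs := by
  cases cs with
  | nil => simp [goA, wordsS]
  | cons c r =>
    by_cases hu : PySem.Chars.isupper c
    · simp only [goA, hu, if_pos]
      rw [goA_eq_wordsS_aux r [c] (by simp)]
      simp [wordsS]
    · simp only [goA, hu]
      rw [goA_eq_wordsS_aux r ([] ++ [c]) (by simp)]
      simp [wordsS]

-- The inner loop lands just past the longest non-uppercase run after e.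
theorem pvInnerEnd_eq (cs : List Char) (e : Nat) (he : e ≤ cs.length) :
    pvInnerEnd cs e = e + ((cs.drop e).takeWhile (fun d => !PySem.Chars.isupper d)).length := by
  unfold pvInnerEnd
  split
  · rename_i h
    have hd : cs.drop e = cs[e]'(by omega) :: cs.drop (e + 1) :=
      (List.drop_eq_getElem_cons (by omega)).trans rfl
    split
    · rename_i hu
      rw [hd, List.takeWhile_cons, if_neg (by simpa using hu)]
      simp
    · rename_i hu
      rw [pvInnerEnd_eq cs (e + 1) (by omega)]
      rw [hd, List.takeWhile_cons, if_pos (by simpa using hu)]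
      simp; omega
  · rename_i h
    rw [List.drop_eq_nil_of_le (by omega)]
    simp
termination_by cs.length - e
decreasing_by omega

-- The outer loop appends exactly the structural word list of the unscanned suffix.
theorem pvOuter_eq (cs : List Char) (start : Nat) (hs : start ≤ cs.length)
    (words : List (List Char)) :
    pvOuter cs start words = words ++ wordsS (cs.drop start) := by
  unfold pvOuter
  split
  · rename_i h
    have hd : cs.drop start = cs[start]'(by omega) :: cs.drop (start + 1) :=
      (List.drop_eq_getElem_cons (by omega)).trans rfl
    have htw : ((cs.drop (start + 1)).takeWhile (fun d => !PySem.Chars.isupper d)).length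
        ≤ (cs.drop (start + 1)).length :=
      (List.takeWhile_sublist (fun d => !PySem.Chars.isupper d)).length_le
    have hlen : (cs.drop (start + 1)).length = cs.length - (start + 1) := by simp
    have hie : pvInnerEnd cs (start + 1)
        = start + 1 + ((cs.drop (start + 1)).takeWhile (fun d => !PySem.Chars.isupper d)).length :=
      pvInnerEnd_eq cs (start + 1) (by omega)
    rw [pvOuter_eq cs (pvInnerEnd cs (start + 1)) (by rw [hie]; omega)]
    -- the slice is the word: the first char plus the non-uppercase run after it
    have hslice : PySem.List.slice cs (some (start : Int)) (some ((pvInnerEnd cs (start + 1)) : Int))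
        = cs[start]'(by omega) ::
            ((cs.drop (start + 1)).takeWhile (fun d => !PySem.Chars.isupper d)) := by
      rw [PySem.List.slice_natCast, hie, hd]
      have harg : start + 1 + ((cs.drop (start + 1)).takeWhile (fun d => !PySem.Chars.isupper d)).length - start
          = ((cs.drop (start + 1)).takeWhile (fun d => !PySem.Chars.isupper d)).length + 1 := by omega
      rw [harg, List.take_succ_cons, pvTakeTW]
    -- the next start skips that run: dropping at the inner end is the dropWhile suffix
    have hdrop : cs.drop (pvInnerEnd cs (start + 1))
        = (cs.drop (start + 1)).dropWhile (fun d => !PySem.Chars.isupper d) := by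
      rw [hie, ← pvDropTW (fun d => !PySem.Chars.isupper d) (cs.drop (start + 1)), List.drop_drop]
    rw [hslice, hdrop, hd, wordsS]
    simp
  · rename_i h
    rw [List.drop_eq_nil_of_le (by omega)]
    simp [wordsS]
termination_by cs.length - start
decreasing_by
  have := pvInnerEnd_ge cs (start + 1)
  omega

-- ===== VERDICT (by name: the statement is the Claim_ definition above) =====
theorem split_name_py_spec : Claim_equal_split_name_py := by
  intro name _
  unfold Spec_split_name_py split_name_py split_name_py_alt
  simp only [ne_eq, ite_not]
  rw [foldA_eq_goA name.toList [] []]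
  rw [pvOuter_eq name.toList 0 (by omega) []]
  rw [goA_eq_wordsS]
  simp
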